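-- pv_equiv track=rewrite | github.com/jashmhta/final-hms | backend/core/anomaly_detection.py | _analyze_location_patterns
-- ===== SOURCE A (Python) =====
-- from typing import Dict, List, Optional, Tuple
--
-- def _analyze_location_patterns(current: Dict, historical: List[Dict]) -> Optional[str]:
--     """Analyze location patterns"""
--     current_location = current.get('location')
--     if not current_location:
--         return None
--
--     # Simple distance-based analysis
--     known_locations = [s.get('location') for s in historical if s.get('location')]
--     if not known_locations:
--         return "First time from this location"
--
--     # In production, use geolocation distance calculation
--     if current_location not in known_locations:
--         return "Unusual location detected"
--
--     return None
-- ===== SOURCE B (Python) =====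
-- def _analyze_location_patterns(current, historical):
--     """Analyze location patterns"""
--     current_location = current.get('location')
--     if not current_location:
--         return None
--     # rank of a session: 2 = same location, 1 = some other real location, 0 = no location
--     rank = max(
--         (2 if s.get('location') == current_location
--          else 1 if s.get('location') else 0
--          for s in historical),
--         default=0,
--     )
--     return ("First time from this location", "Unusual location detected", None)[rank]
-- ===== Notes on version B (the rewrite author's own statement) =====
-- stated objective: alternative
-- what changed: Replaces the list build + emptiness test + membership test with a single max-reduction assigning each session a rank (2 match, 1 other location, 0 none) and a constant table indexed by the maximal rank.
import Mathlib
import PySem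

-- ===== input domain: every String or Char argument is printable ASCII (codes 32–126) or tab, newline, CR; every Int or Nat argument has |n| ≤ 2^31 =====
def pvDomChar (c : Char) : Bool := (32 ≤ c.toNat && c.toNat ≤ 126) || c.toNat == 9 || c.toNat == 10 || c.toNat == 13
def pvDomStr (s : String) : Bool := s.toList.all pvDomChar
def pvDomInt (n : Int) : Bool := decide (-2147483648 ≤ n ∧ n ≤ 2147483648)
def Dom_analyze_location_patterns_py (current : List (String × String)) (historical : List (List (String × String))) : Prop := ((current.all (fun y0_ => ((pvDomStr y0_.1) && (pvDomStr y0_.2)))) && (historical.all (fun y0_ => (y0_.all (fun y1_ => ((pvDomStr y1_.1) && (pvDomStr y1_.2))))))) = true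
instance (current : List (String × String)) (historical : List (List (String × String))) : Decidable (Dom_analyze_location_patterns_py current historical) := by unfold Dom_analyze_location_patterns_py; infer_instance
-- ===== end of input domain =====

-- B replaces A's list build + emptiness test + membership test with one max-reduction of per-session
-- ranks (2 match, 1 other location, 0 none) and a constant table indexed by the maximal rank (alternative, same O(n)).

-- ===== PORT A =====
def analyze_location_patterns_py (current : List (String × String)) (historical : List (List (String × String))) : Option String :=
  match (PySem.Dict.mk current).get? "location" with
  | none => none
  | some cl =>
    if cl = "" then none
    else
      let known_locations : List String :=
        historical.filterMap (fun s =>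
          match (PySem.Dict.mk s).get? "location" with
          | none => none
          | some l => if l = "" then none else some l)
      if known_locations = [] then some "First time from this location"
      else if cl ∉ known_locations then some "Unusual location detected"
      else none

-- ===== PORT B =====
-- rank of one session: 2 if its location equals current, 1 if it has some other truthy location, 0 otherwise
def pvRank (cl : String) (s : List (String × String)) : Nat :=
  match (PySem.Dict.mk s).get? "location" with
  | none => 0
  | some l => if l = cl then 2 else if l = "" then 0 else 1

def analyze_location_patterns_py_alt (current : List (String × String)) (historical : List (List (String × String))) : Option String :=
  match (PySem.Dict.mk current).get? "location" with
  | none => none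
  | some cl =>
    if cl = "" then none
    else
      -- Python max over a generator with default=0: running maximum, left to right
      let rank := historical.foldl (fun acc s => Nat.max acc (pvRank cl s)) 0
      match rank with
      | 0 => some "First time from this location"
      | 1 => some "Unusual location detected"
      | _ => none

-- ===== PRECONDITION & SPEC =====
def Spec_analyze_location_patterns_py (current : List (String × String)) (historical : List (List (String × String))) (out : Option String) : Prop := out = analyze_location_patterns_py_alt current historical
instance (current : List (String × String)) (historical : List (List (String × String))) (out : Option String) : Decidable (Spec_analyze_location_patterns_py current historical out) := by unfold Spec_analyze_location_patterns_py; infer_instance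

-- ===== CLAIM (what is proved, stated in full; the proofs are below) =====
def Claim_equal_analyze_location_patterns_py : Prop := ∀ (current : List (String × String)) (historical : List (List (String × String))), Dom_analyze_location_patterns_py current historical → Spec_analyze_location_patterns_py current historical (analyze_location_patterns_py current historical)

-- ===== LEMMAS AND PROOFS =====
def pvLoc (s : List (String × String)) : Option String :=
  match (PySem.Dict.mk s).get? "location" with
  | none => none
  | some l => if l = "" then none else some l

theorem pvKnown_eq (hist : List (List (String × String))) :
    hist.filterMap (fun s =>
      match (PySem.Dict.mk s).get? "location" with
      | none => none
      | some l => if l = "" then none else some l) = hist.filterMap pvLoc := rfl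

theorem pvRank_eq (cl : String) (hcl : cl ≠ "") (s : List (String × String)) :
    pvRank cl s = match pvLoc s with
      | none => 0
      | some l => if l = cl then 2 else 1 := by
  unfold pvRank pvLoc
  cases (PySem.Dict.mk s).get? "location" with
  | none => rfl
  | some l =>
    by_cases he : l = ""
    · subst he; simp [Ne.symm hcl]
    · simp [he]

theorem pvFold_max (cl : String) (hist : List (List (String × String))) (acc : Nat) :
    hist.foldl (fun a s => Nat.max a (pvRank cl s)) acc
      = Nat.max acc (hist.foldr (fun s a => Nat.max (pvRank cl s) a) 0) := by
  induction hist generalizing acc with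
  | nil => simp
  | cons s rest ih =>
    simp only [List.foldl, List.foldr, ih (Nat.max acc (pvRank cl s))]
    exact Nat.max_assoc acc (pvRank cl s) _

theorem pvFoldr_le (cl : String) (hcl : cl ≠ "") (hist : List (List (String × String))) :
    hist.foldr (fun s a => Nat.max (pvRank cl s) a) 0 ≤ 2 := by
  induction hist with
  | nil => simp
  | cons s rest ih =>
    have h1 : pvRank cl s ≤ 2 := by
      rw [pvRank_eq cl hcl]
      cases pvLoc s
      · simp
      · simp only []; split_ifs <;> omega
    simpa using Nat.max_le.mpr ⟨h1, ih⟩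

theorem pvFoldr_eq (cl : String) (hcl : cl ≠ "") (hist : List (List (String × String))) :
    hist.foldr (fun s a => Nat.max (pvRank cl s) a) 0
      = if cl ∈ hist.filterMap pvLoc then 2 else if hist.filterMap pvLoc = [] then 0 else 1 := by
  induction hist with
  | nil => simp
  | cons s rest ih =>
    have hle := pvFoldr_le cl hcl rest
    cases hL : pvLoc s with
    | none =>
      have hr : pvRank cl s = 0 := by rw [pvRank_eq cl hcl, hL]
      simp [List.foldr, hL, hr, ih]
    | some l =>
      by_cases hl : l = cl
      · have hr : pvRank cl s = 2 := by rw [pvRank_eq cl hcl, hL]; simp [hl]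
        rw [ih] at hle
        simp only [List.foldr, List.filterMap_cons, hL, hr, ih, hl, List.mem_cons, true_or, if_pos]
        exact Nat.max_eq_left hle
      · have hr : pvRank cl s = 1 := by rw [pvRank_eq cl hcl, hL]; simp [hl]
        simp only [List.foldr, List.filterMap_cons, hL, hr, ih, List.mem_cons, Ne.symm hl, false_or]
        by_cases hm : cl ∈ rest.filterMap pvLoc
        · simp [hm]
        · by_cases hem : rest.filterMap pvLoc = [] <;> simp [hm, hem]

theorem analyze_location_patterns_py_spec : Claim_equal_analyze_location_patterns_py := by
  intro current historical _
  unfold Spec_analyze_location_patterns_py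
  unfold analyze_location_patterns_py analyze_location_patterns_py_alt
  cases h : (PySem.Dict.mk current).get? "location" with
  | none => rfl
  | some cl =>
    dsimp only
    by_cases hcl : cl = ""
    · simp [hcl]
    · simp only [if_neg hcl]
      rw [pvFold_max]
      have hz : Nat.max 0 (List.foldr (fun s a => Nat.max (pvRank cl s) a) 0 historical)
          = List.foldr (fun s a => Nat.max (pvRank cl s) a) 0 historical := Nat.zero_max _
      rw [hz, pvFoldr_eq cl hcl, pvKnown_eq]
      by_cases hmem : cl ∈ historical.filterMap pvLoc
      · have hne : historical.filterMap pvLoc ≠ [] := by intro he; simp [he] at hmem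
        simp [hmem, hne]
      · by_cases hem : historical.filterMap pvLoc = []
        · simp [hem]
        · simp [hmem, hem]
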